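-- pv_equiv track=rewrite | github.com/Isaac-1911/encryptor | ciphers/blok.py | permute_block
-- ===== SOURCE A (Python) =====
-- def permute_block(block, perm_key):
--     # Permutasi index huruf dalam blok (0-3)
--     if len(block) < 4:
--         block += 'X' * (4 - len(block))  # padding
--     perm_key = [int(x) % 4 for x in str(perm_key)]
--     while len(perm_key) < 4:
--         perm_key += perm_key  # ulangi jika pendek
--     perm_key = perm_key[:4]
--     return ''.join(block[i] for i in perm_key)
-- ===== SOURCE B (Python) =====
-- def permute_block(block, perm_key):
--     # Extract key digits arithmetically (no str conversion), then emit 4 chars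
--     # by walking the digit list with a cyclic cursor.
--     chars = (block + 'XXXX')[:4]
--     def digits(n):
--         return digits(n // 10) + [n % 10] if n >= 10 else [n]
--     ds = digits(perm_key)
--     out = []
--     i = 0
--     while len(out) < 4:
--         out.append(chars[ds[i] % 4])
--         i = (i + 1) % len(ds)
--     return ''.join(out)
-- ===== Notes on version B (the rewrite author's own statement) =====
-- stated objective: alternative
-- what changed: B never converts the key to a string: it extracts the key digits arithmetically by recursive divmod, and instead of A's geometric doubling of the digit list plus slice it emits the 4 output characters with a while-loop whose cursor cycles through the digit list modulo its length.
import Mathlib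
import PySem

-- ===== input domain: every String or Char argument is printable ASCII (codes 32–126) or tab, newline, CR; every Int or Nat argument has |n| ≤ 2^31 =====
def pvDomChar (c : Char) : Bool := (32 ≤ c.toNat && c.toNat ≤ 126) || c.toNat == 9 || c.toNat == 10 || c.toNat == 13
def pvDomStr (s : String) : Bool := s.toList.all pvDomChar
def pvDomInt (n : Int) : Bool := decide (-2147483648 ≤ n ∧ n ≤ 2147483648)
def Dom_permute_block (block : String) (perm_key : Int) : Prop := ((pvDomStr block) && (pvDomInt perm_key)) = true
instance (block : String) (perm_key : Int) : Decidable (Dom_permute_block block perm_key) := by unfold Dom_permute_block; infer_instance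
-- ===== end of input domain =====

-- B extracts the key digits arithmetically by recursive divmod (no str conversion) and emits the
-- 4 output characters with a cyclic-cursor loop instead of A's geometric list doubling (objective: alternative).


-- ===== PORT A =====
-- [int(x) % 4 for x in str(perm_key)]
def pbDigits (perm_key : Int) : List Int :=
  (PySem.Int.toChars perm_key).map (fun c => PySem.Int.mod ((PySem.Int.ofChars? [c]).getD 0) 4)

-- while len(perm_key) < 4: perm_key += perm_key   (the [] guard only makes the loop total; unreachable, str(int) is never empty)
def pbExpand (l : List Int) : List Int :=
  if l.length < 4 then
    if _h : l = [] then l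
    else pbExpand (l ++ l)
  else l
termination_by 4 - l.length
decreasing_by
  have : 0 < l.length := List.length_pos_iff.mpr _h
  simp only [List.length_append]; omega

def permute_block (block : String) (perm_key : Int) : String :=
  let bl := block.toList
  let bl := if PySem.Chars.len bl < 4 then bl ++ List.replicate (4 - bl.length) 'X' else bl
  let pk := PySem.List.slice (pbExpand (pbDigits perm_key)) none (some 4)
  -- block[i]: the .getD 'X' default is unreachable (every i is a digit mod 4 and len(block) ≥ 4 after padding)
  String.ofList (pk.map (fun i => (PySem.List.pyGet? bl i).getD 'X'))

-- ===== PORT B =====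
-- def digits(n): return digits(n // 10) + [n % 10] if n >= 10 else [n]
def pbArithDigits (n : Int) : List Int :=
  if h : 10 ≤ n then pbArithDigits (PySem.Int.floordiv n 10) ++ [PySem.Int.mod n 10] else [n]
termination_by n.toNat
decreasing_by
  rw [PySem.Int.floordiv_eq_ediv_of_pos (by norm_num)]
  omega

-- while len(out) < 4: out.append(chars[ds[i] % 4]); i = (i + 1) % len(ds)
-- (ds[i] and chars[j]: the .getD defaults are unreachable — i stays in range and ds[i] % 4 < 4 = len(chars))
def pbLoop (chars : List Char) (ds : List Int) (out : List Char) (i : Int) : List Char :=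
  if hlen : out.length < 4 then
    pbLoop chars ds
      (out ++ [(PySem.List.pyGet? chars (PySem.Int.mod ((PySem.List.pyGet? ds i).getD 0) 4)).getD 'X'])
      (PySem.Int.mod (i + 1) (ds.length : Int))
  else out
termination_by 4 - out.length
decreasing_by simp only [List.length_append, List.length_cons, List.length_nil]; omega

def permute_block_alt (block : String) (perm_key : Int) : String :=
  -- chars = (block + 'XXXX')[:4]  (the 4-tuple b0..b3, kept as the 4-element list)
  let chars := PySem.List.slice (block.toList ++ ['X','X','X','X']) none (some 4)
  let ds := pbArithDigits perm_key
  String.ofList (pbLoop chars ds [] 0)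

-- ===== PRECONDITION & SPEC =====
-- Pre_ excludes negative perm_key: str(-n) starts with '-', so int('-') raises ValueError in A.
def Pre_permute_block (block : String) (perm_key : Int) : Prop := 0 ≤ perm_key
instance (block : String) (perm_key : Int) : Decidable (Pre_permute_block block perm_key) := by unfold Pre_permute_block; infer_instance
def pvWitness_permute_block : String × Int := ("ab", 12)

def Spec_permute_block (block : String) (perm_key : Int) (out : String) : Prop := out = permute_block_alt block perm_key
instance (block : String) (perm_key : Int) (out : String) : Decidable (Spec_permute_block block perm_key out) := by unfold Spec_permute_block; infer_instance

-- ===== CLAIM (what is proved, stated in full; the proofs are below) =====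
def Claim_equal_permute_block : Prop := ∀ (block : String) (perm_key : Int), Dom_permute_block block perm_key → Pre_permute_block block perm_key → Spec_permute_block block perm_key (permute_block block perm_key)

-- ===== LEMMAS AND PROOFS =====

lemma toDigits_ne_nil (b n : Nat) : Nat.toDigits b n ≠ [] := by
  show Nat.toDigitsCore b (n+1) n [] ≠ []
  rw [Nat.toDigitsCore]
  split
  · simp
  · intro hc
    have := Nat.toDigitsCore_lens_eq b n (n / b) ((n % b).digitChar) []
    rw [hc] at this
    simp at this

lemma pbDigits_ne_nil (pk : Int) (h : 0 ≤ pk) : pbDigits pk ≠ [] := by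
  simp [pbDigits, PySem.Int.toChars, Int.not_lt.mpr h, toDigits_ne_nil]

lemma pbDigits_bounds (pk : Int) {x : Int} (hx : x ∈ pbDigits pk) : 0 ≤ x ∧ x < 4 := by
  simp only [pbDigits, List.mem_map] at hx
  obtain ⟨c, -, rfl⟩ := hx
  exact ⟨PySem.Int.mod_nonneg _ (by norm_num), PySem.Int.mod_lt _ (by norm_num)⟩

-- the modular read at position i of a cyclically indexed list
def gIdx (l : List Int) (i : Int) : Int := (PySem.List.pyGet? l (PySem.Int.mod i (l.length : Int))).getD 0

-- A's expanded-and-truncated key list equals four modular reads.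
lemma pbExpand_take (l : List Int) (h : l ≠ []) :
    (pbExpand l).take 4 = (PySem.List.pyRange 0 4 1).map (gIdx l) := by
  match l with
  | [a] =>
    rw [show PySem.List.pyRange 0 4 1 = [0,1,2,3] from by decide]
    simp [pbExpand, gIdx, PySem.List.pyGet?, PySem.List.pyIdx?, PySem.Int.mod]
  | [a, b] =>
    rw [show PySem.List.pyRange 0 4 1 = [0,1,2,3] from by decide]
    simp [pbExpand, gIdx, PySem.List.pyGet?, PySem.List.pyIdx?, PySem.Int.mod]
  | [a, b, c] =>
    rw [show PySem.List.pyRange 0 4 1 = [0,1,2,3] from by decide]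
    simp [pbExpand, gIdx, PySem.List.pyGet?, PySem.List.pyIdx?, PySem.Int.mod]
  | a :: b :: c :: d :: r =>
    rw [show PySem.List.pyRange 0 4 1 = [0,1,2,3] from by decide]
    rw [pbExpand, if_neg (by simp)]
    have hmod : ∀ i : Int, 0 ≤ i → i < 4 → PySem.Int.mod i (((a::b::c::d::r) : List Int).length : Int) = i := by
      intro i h0 h4
      rw [PySem.Int.mod_eq_emod_of_pos (by simp; omega)]
      exact Int.emod_eq_of_lt h0 (by simp; omega)
    simp only [List.map_cons, List.map_nil, gIdx]
    rw [hmod 0 (by norm_num) (by norm_num), hmod 1 (by norm_num) (by norm_num),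
        hmod 2 (by norm_num) (by norm_num), hmod 3 (by norm_num) (by norm_num)]
    have h1 : (0:Int) ≤ (r.length:Int) + 1 + 1 + 1 := by positivity
    have h2 : (0:Int) ≤ (r.length:Int) + 1 + 1 := by positivity
    have h3 : (2:Int) ≤ (r.length:Int) + 1 + 1 + 1 := by omega
    have h4 : (3:Int) ≤ (r.length:Int) + 1 + 1 + 1 := by omega
    simp [PySem.List.pyGet?, PySem.List.pyIdx?, h1, h2, h3, h4]

-- A's padded block and B's padded block agree at every index in [0, 4).
lemma pad_get (bl : List Char) (i : Int) (h0 : 0 ≤ i) (h4 : i < 4) :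
    PySem.List.pyGet? (if PySem.Chars.len bl < 4 then bl ++ List.replicate (4 - bl.length) 'X' else bl) i
      = PySem.List.pyGet? (PySem.List.slice (bl ++ ['X','X','X','X']) none (some 4)) i := by
  rw [PySem.List.slice_to _ (by norm_num : (0:Int) ≤ 4)]
  rw [PySem.List.pyGet?_of_nonneg _ h0, PySem.List.pyGet?_of_nonneg _ h0]
  have hi4 : i.toNat < 4 := by omega
  rw [show ((4:Int).toNat) = 4 from rfl, List.getElem?_take_of_lt hi4]
  split_ifs with hlt
  · have hblt : bl.length < 4 := by
      rw [PySem.Chars.len_eq] at hlt; exact_mod_cast hlt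
    rcases Nat.lt_or_ge i.toNat bl.length with hc | hc
    · rw [List.getElem?_append_left hc, List.getElem?_append_left hc]
    · rw [List.getElem?_append_right hc, List.getElem?_append_right hc]
      rw [List.getElem?_eq_getElem (by simp; omega), List.getElem?_eq_getElem (by simp; omega)]
      simp only [show (['X','X','X','X'] : List Char) = List.replicate 4 'X' from rfl,
        List.getElem_replicate]
  · have hble : 4 ≤ bl.length := by
      rw [PySem.Chars.len_eq] at hlt; omega
    rw [List.getElem?_append_left (by omega)]

-- the char digits str(n) produces, characterised arithmetically
def pbCharDigits (n : Nat) : List Char :=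
  if n < 10 then [Nat.digitChar n] else pbCharDigits (n / 10) ++ [Nat.digitChar (n % 10)]
termination_by n
decreasing_by exact Nat.div_lt_self (by omega) (by norm_num)

lemma toDigitsCore_eq : ∀ (fuel n : Nat) (ds : List Char), n < fuel →
    Nat.toDigitsCore 10 fuel n ds = pbCharDigits n ++ ds := by
  intro fuel
  induction fuel with
  | zero => intro n ds h; omega
  | succ f ih =>
    intro n ds h
    rw [Nat.toDigitsCore]
    by_cases h0 : n / 10 = 0
    · rw [if_pos h0, pbCharDigits, if_pos (by omega), Nat.mod_eq_of_lt (by omega)]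
      simp
    · have hlt : n / 10 < f := by
        have := Nat.div_lt_self (show 0 < n by omega) (show 1 < 10 by norm_num)
        omega
      rw [if_neg h0, ih (n / 10) ((n % 10).digitChar :: ds) hlt]
      conv_rhs => rw [pbCharDigits, if_neg (show ¬ n < 10 by omega)]
      simp

lemma toDigits_eq (n : Nat) : Nat.toDigits 10 n = pbCharDigits n := by
  show Nat.toDigitsCore 10 (n+1) n [] = _
  rw [toDigitsCore_eq _ _ _ (by omega)]
  simp

lemma parse_digitChar (d : Nat) (h : d < 10) :
    (PySem.Int.ofChars? [Nat.digitChar d]).getD 0 = (d : Int) := by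
  interval_cases d <;> decide

-- str-digit extraction parsed back = B's arithmetic digit extraction
lemma map_parse_charDigits (m : Nat) :
    (pbCharDigits m).map (fun c => ((PySem.Int.ofChars? [c]).getD 0 : Int)) = pbArithDigits (m : Int) := by
  induction m using Nat.strong_induction_on with
  | _ m ih =>
    by_cases h : m < 10
    · rw [pbCharDigits, if_pos h, pbArithDigits, dif_neg (by exact_mod_cast not_le.mpr h)]
      simp [parse_digitChar m h]
    · rw [pbCharDigits, if_neg h, pbArithDigits, dif_pos (by exact_mod_cast not_lt.mp h)]
      rw [List.map_append, ih (m / 10) (Nat.div_lt_self (by omega) (by norm_num))]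
      have hd : PySem.Int.floordiv (m : Int) 10 = ((m / 10 : Nat) : Int) := by
        exact_mod_cast PySem.Int.floordiv_natCast m 10
      have hm : PySem.Int.mod (m : Int) 10 = ((m % 10 : Nat) : Int) := by
        exact_mod_cast PySem.Int.mod_natCast m 10
      rw [hd, hm]
      simp [parse_digitChar (m % 10) (Nat.mod_lt _ (by norm_num))]

lemma pbDigits_eq_arith (pk : Int) (h : 0 ≤ pk) :
    pbDigits pk = (pbArithDigits pk).map (fun d => PySem.Int.mod d 4) := by
  unfold pbDigits
  rw [PySem.Int.toChars, if_neg (Int.not_lt.mpr h), toDigits_eq,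
      show (fun c => PySem.Int.mod ((PySem.Int.ofChars? [c]).getD 0) 4)
         = (fun d => PySem.Int.mod d 4) ∘ (fun c => ((PySem.Int.ofChars? [c]).getD 0 : Int)) from rfl,
      ← List.map_map, map_parse_charDigits, Int.toNat_of_nonneg h]

lemma pyGet?_map_modFour (ds : List Int) (j : Int) :
    ((PySem.List.pyGet? (ds.map (fun d => PySem.Int.mod d 4)) j).getD 0)
      = PySem.Int.mod ((PySem.List.pyGet? ds j).getD 0) 4 := by
  simp only [PySem.List.pyGet?, PySem.List.pyIdx?, List.length_map]
  split_ifs with h1 h2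
  · simp only [Option.bind_some, List.getElem?_map]
    cases ds[j.toNat]? <;> rfl
  · rfl
  · simp only [Option.bind_some, List.getElem?_map]
    cases ds[ds.length - (-j).toNat]? <;> rfl
  · rfl

-- one cyclic-cursor step preserves "cursor = k % len"
lemma mod_step (L a : Int) (hL : 0 < L) :
    PySem.Int.mod (PySem.Int.mod a L + 1) L = PySem.Int.mod (a + 1) L := by
  rw [PySem.Int.mod_eq_emod_of_pos hL, PySem.Int.mod_eq_emod_of_pos hL,
      PySem.Int.mod_eq_emod_of_pos hL]
  exact Int.emod_add_emod a L 1

-- B's loop, fully unrolled: four modular reads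
lemma pbLoop_unroll (chars : List Char) (ds : List Int) (hds : ds ≠ []) :
    pbLoop chars ds [] 0 = (PySem.List.pyRange 0 4 1).map (fun k =>
      (PySem.List.pyGet? chars (PySem.Int.mod (gIdx ds k) 4)).getD 'X') := by
  have hL : (0:Int) < (ds.length : Int) := by
    have := List.length_pos_iff.mpr hds; exact_mod_cast this
  have h0 : PySem.Int.mod 0 (ds.length : Int) = 0 := by
    rw [PySem.Int.mod_eq_emod_of_pos hL]; simp
  have h2 : PySem.Int.mod (PySem.Int.mod 1 (ds.length : Int) + 1) (ds.length : Int)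
      = PySem.Int.mod 2 (ds.length : Int) := by
    rw [mod_step _ _ hL]; norm_num
  have h3 : PySem.Int.mod (PySem.Int.mod 2 (ds.length : Int) + 1) (ds.length : Int)
      = PySem.Int.mod 3 (ds.length : Int) := by
    rw [mod_step _ _ hL]; norm_num
  rw [show PySem.List.pyRange 0 4 1 = [0,1,2,3] from by decide]
  simp only [List.map_cons, List.map_nil, gIdx, h0]
  rw [pbLoop, dif_pos (by simp)]
  rw [pbLoop, dif_pos (by simp)]
  rw [pbLoop, dif_pos (by simp)]
  rw [pbLoop, dif_pos (by simp)]
  rw [pbLoop, dif_neg (by simp)]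
  norm_num [h2, h3]

-- ===== VERDICT (by name: the statement is the Claim_ definition above) =====
theorem permute_block_spec : Claim_equal_permute_block := by
  intro block pk _hdom hpre
  unfold Spec_permute_block permute_block permute_block_alt
  simp only []
  rw [PySem.List.slice_to _ (by norm_num : (0:Int) ≤ 4)]
  rw [show ((4:Int).toNat) = 4 from rfl]
  rw [pbExpand_take _ (pbDigits_ne_nil pk hpre)]
  rw [pbLoop_unroll _ _ (by rw [pbArithDigits]; split <;> simp)]
  rw [List.map_map]
  apply congrArg
  apply List.map_congr_left
  intro i _hi
  show (PySem.List.pyGet? _ (gIdx (pbDigits pk) i)).getD 'X' = _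
  have hb : 0 ≤ gIdx (pbDigits pk) i ∧ gIdx (pbDigits pk) i < 4 := by
    unfold gIdx
    cases hg : PySem.List.pyGet? (pbDigits pk) (PySem.Int.mod i (((pbDigits pk).length) : Int)) with
    | none => simp
    | some x =>
      simp only [Option.getD_some]
      exact pbDigits_bounds pk (PySem.List.mem_of_pyGet?_eq_some _ hg)
  rw [pad_get block.toList _ hb.1 hb.2]
  have hg : gIdx (pbDigits pk) i = PySem.Int.mod (gIdx (pbArithDigits pk) i) 4 := by
    unfold gIdx
    rw [pbDigits_eq_arith pk hpre, List.length_map, pyGet?_map_modFour]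
  rw [hg]
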